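-- pv_equiv track=rewrite | github.com/ornotandrew/cheaters | temp/comparator.py | get_hash_values
-- ===== SOURCE A (Python) =====
-- def get_hash_values(ngram_pairs):
--     hash_values = [None]*len(ngram_pairs)
--     for hash_index in range(len(ngram_pairs)):
--         _hash_value = 0
--         _current_ngram = ngram_pairs[hash_index][0]
--         for i in range(len(_current_ngram)):
--             # TODO: use a rolling hash
--             _hash_value += ord(_current_ngram[i])*10**(len(_current_ngram)-i-1)
--         hash_values[hash_index] = [_hash_value, ngram_pairs[hash_index][1]]
--     return hash_values
-- ===== SOURCE B (Python) =====
-- def _horner(ngram):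
--     h = 0
--     for ch in ngram:
--         h = h * 10 + ord(ch)
--     return h
--
-- def get_hash_values(ngram_pairs):
--     return [[_horner(ngram), count] for ngram, count in ngram_pairs]
-- ===== Notes on version B (the rewrite author's own statement) =====
-- stated objective: faster
-- what changed: Replaces the per-character power computation 10**(len-i-1) inside the index loop by a single Horner pass h = h*10 + ord(c) over each ngram, building the result by comprehension instead of preallocating and assigning.
import Mathlib
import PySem

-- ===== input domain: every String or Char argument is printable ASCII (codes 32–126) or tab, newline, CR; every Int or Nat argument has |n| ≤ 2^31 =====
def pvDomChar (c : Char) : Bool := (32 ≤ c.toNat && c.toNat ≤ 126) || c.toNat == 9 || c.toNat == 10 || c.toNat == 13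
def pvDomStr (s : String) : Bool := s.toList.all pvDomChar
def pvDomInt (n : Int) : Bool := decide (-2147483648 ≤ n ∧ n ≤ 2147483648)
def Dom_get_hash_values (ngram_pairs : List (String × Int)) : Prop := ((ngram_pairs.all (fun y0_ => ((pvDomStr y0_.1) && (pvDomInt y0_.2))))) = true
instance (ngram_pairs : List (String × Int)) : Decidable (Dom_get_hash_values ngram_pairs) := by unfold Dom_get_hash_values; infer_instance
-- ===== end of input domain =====

-- B replaces A's per-character 10**(len-i-1) power inside the index loop by one Horner pass (h = h*10 + ord c) per ngram.


-- ===== PORT A =====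
-- the inner 'for i in range(len(_current_ngram))' accumulator: ord(c[i]) * 10**(len-i-1)
def pvHashA (cs : List Char) : Int :=
  (PySem.List.pyRange 0 cs.length 1).foldl
    (fun acc i => acc + ((PySem.List.pyGetD cs i ' ').toNat : Int) * 10 ^ ((cs.length : Int) - i - 1).toNat) 0

def get_hash_values (ngram_pairs : List (String × Int)) : List (List Int) :=
  (PySem.List.pyRange 0 ngram_pairs.length 1).map
    (fun hash_index =>
      let pair := PySem.List.pyGetD ngram_pairs hash_index ("", 0)
      [pvHashA pair.1.toList, pair.2])

-- ===== PORT B =====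
def pvHorner (cs : List Char) : Int :=
  cs.foldl (fun h c => h * 10 + (c.toNat : Int)) 0

def get_hash_values_alt (ngram_pairs : List (String × Int)) : List (List Int) :=
  ngram_pairs.map (fun p => [pvHorner p.1.toList, p.2])

-- ===== PRECONDITION & SPEC =====
def Spec_get_hash_values (ngram_pairs : List (String × Int)) (out : List (List Int)) : Prop := out = get_hash_values_alt ngram_pairs
instance (ngram_pairs : List (String × Int)) (out : List (List Int)) : Decidable (Spec_get_hash_values ngram_pairs out) := by unfold Spec_get_hash_values; infer_instance

-- ===== CLAIM (what is proved, stated in full; the proofs are below) =====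
def Claim_equal_get_hash_values : Prop := ∀ (ngram_pairs : List (String × Int)), Dom_get_hash_values ngram_pairs → Spec_get_hash_values ngram_pairs (get_hash_values ngram_pairs)

-- ===== LEMMAS AND PROOFS =====

-- positional sum  Σ_k c_k * 10^(n-1-k)  equals the Horner fold
theorem sum_pow_eq_horner (cs : List Char) :
    ((List.range cs.length).map
      (fun k => ((cs.getD k ' ').toNat : Int) * 10 ^ (cs.length - k - 1))).sum
      = pvHorner cs := by
  induction cs using List.reverseRecOn with
  | nil => simp [pvHorner]
  | append_singleton ds c ih =>
    have hlen : (ds ++ [c]).length = ds.length + 1 := by simp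
    rw [hlen, List.range_succ, List.map_append, List.sum_append]
    have hmap : (List.range ds.length).map
        (fun k => (((ds ++ [c]).getD k ' ').toNat : Int) * 10 ^ (ds.length + 1 - k - 1))
        = (List.range ds.length).map
        (fun k => ((ds.getD k ' ').toNat : Int) * 10 ^ (ds.length - k - 1) * 10) := by
      refine List.map_congr_left ?_
      intro k hk
      rw [List.mem_range] at hk
      have h1 : (ds ++ [c]).getD k ' ' = ds.getD k ' ' := by
        simp [List.getD, List.getElem?_append_left hk]
      have h2 : ds.length + 1 - k - 1 = (ds.length - k - 1) + 1 := by omega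
      rw [h1, h2, pow_succ]; ring
    rw [hmap]
    have hsum : ((List.range ds.length).map
        (fun k => ((ds.getD k ' ').toNat : Int) * 10 ^ (ds.length - k - 1) * 10)).sum
        = ((List.range ds.length).map
        (fun k => ((ds.getD k ' ').toNat : Int) * 10 ^ (ds.length - k - 1))).sum * 10 := by
      simp [← List.sum_map_mul_right]
    rw [hsum, ih]
    simp [pvHorner]

-- A's inner index loop computes the positional sum, hence the Horner value
theorem pvHashA_eq_horner (cs : List Char) : pvHashA cs = pvHorner cs := by
  unfold pvHashA
  rw [PySem.List.foldl_add, PySem.List.pyRange_one]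
  simp only [zero_add, sub_zero, Int.toNat_natCast, List.map_map]
  rw [← sum_pow_eq_horner cs]
  refine congrArg List.sum (List.map_congr_left ?_)
  intro k hk
  rw [List.mem_range] at hk
  simp only [Function.comp, PySem.List.pyGetD_natCast]
  congr 2
  omega

-- ===== VERDICT (by name: the statement is the Claim_ definition above) =====
theorem get_hash_values_spec : Claim_equal_get_hash_values := by
  intro ngram_pairs _
  unfold Spec_get_hash_values get_hash_values get_hash_values_alt
  have h := PySem.List.map_pyGetD_pyRange_zero (xs := ngram_pairs) (d := (("", 0) : String × Int))
  simp only [PySem.List.len_eq] at h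
  calc (PySem.List.pyRange 0 ngram_pairs.length 1).map
        (fun hash_index =>
          let pair := PySem.List.pyGetD ngram_pairs hash_index ("", 0)
          [pvHashA pair.1.toList, pair.2])
      = ((PySem.List.pyRange 0 ngram_pairs.length 1).map
          (fun j => PySem.List.pyGetD ngram_pairs j ("", 0))).map
          (fun p => [pvHashA p.1.toList, p.2]) := by rw [List.map_map]; rfl
    _ = ngram_pairs.map (fun p => [pvHashA p.1.toList, p.2]) := by rw [h]
    _ = ngram_pairs.map (fun p => [pvHorner p.1.toList, p.2]) := by
          simp [pvHashA_eq_horner]
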